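-- pv_equiv track=rewrite | github.com/MARUCIE/cognebula-enterprise | src/audit/ontology_conformance.py | classify_rogue_edges
-- ===== SOURCE A (Python) =====
-- from typing import Any
--
-- CODE_ANALYSIS_REL_PREFIXES = {
--     "CALLS_",
--     "DEFINES_",
--     "DEFINES",
--     "IMPORTS_",
--     "EXTENDS_",
--     "IMPLEMENTS_",
--     "CONTAINS_",
--     "CONTAINS",
--     "MEMBER_OF",
-- }
--
-- LEGACY_REL_PREFIXES = {"FT_", "OP_", "CO_", "XL_", "DOC_"}
--
-- def _match_prefix(name: str, prefixes: set[str]) -> bool: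
--     """True if `name` starts with any member of `prefixes`, or matches exactly
--     a prefix that was declared without a trailing underscore."""
--     for p in prefixes:
--         if p.endswith("_"):
--             if name.startswith(p):
--                 return True
--         elif name == p:
--             return True
--     return False
--
-- def classify_rogue_edges(rogue_edges: set[str]) -> dict[str, Any]:
--     """Bucket rogue REL table names by origin.
--
--     Returns keys: code_analysis_residue, legacy_prefixes, other.
--     """
--     code = sorted(
--         n for n in rogue_edges if _match_prefix(n, CODE_ANALYSIS_REL_PREFIXES)
--     )
--     legacy = sorted(n for n in rogue_edges if _match_prefix(n, LEGACY_REL_PREFIXES))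
--     classified = set(code) | set(legacy)
--     return {
--         "code_analysis_residue": code,
--         "legacy_prefixes": legacy,
--         "other": sorted(rogue_edges - classified),
--     }
-- ===== SOURCE B (Python) =====
-- CODE_ANALYSIS_REL_PREFIXES = {
--     "CALLS_",
--     "DEFINES_",
--     "DEFINES",
--     "IMPORTS_",
--     "EXTENDS_",
--     "IMPLEMENTS_",
--     "CONTAINS_",
--     "CONTAINS",
--     "MEMBER_OF",
-- }
--
-- LEGACY_REL_PREFIXES = {"FT_", "OP_", "CO_", "XL_", "DOC_"}
--
-- def _match_prefix(name, prefixes):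
--     for p in prefixes:
--         if p.endswith("_"):
--             if name.startswith(p):
--                 return True
--         elif name == p:
--             return True
--     return False
--
-- def classify_rogue_edges(rogue_edges):
--     """Single categorizing pass: each name goes to exactly one bucket."""
--     code, legacy, other = [], [], []
--     for n in rogue_edges:
--         if _match_prefix(n, CODE_ANALYSIS_REL_PREFIXES):
--             code.append(n)
--         elif _match_prefix(n, LEGACY_REL_PREFIXES):
--             legacy.append(n)
--         else:
--             other.append(n)
--     return {
--         "code_analysis_residue": sorted(code),
--         "legacy_prefixes": sorted(legacy),
--         "other": sorted(other),
--     }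
-- ===== Notes on version B (the rewrite author's own statement) =====
-- stated objective: alternative
-- what changed: Replaces A's three independent scans over rogue_edges (two prefix filters plus a set-difference for the complement) by one categorizing pass that appends each name to exactly one of three buckets (relying on the provable disjointness of the two prefix sets), sorting each bucket once at the end.
import Mathlib
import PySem

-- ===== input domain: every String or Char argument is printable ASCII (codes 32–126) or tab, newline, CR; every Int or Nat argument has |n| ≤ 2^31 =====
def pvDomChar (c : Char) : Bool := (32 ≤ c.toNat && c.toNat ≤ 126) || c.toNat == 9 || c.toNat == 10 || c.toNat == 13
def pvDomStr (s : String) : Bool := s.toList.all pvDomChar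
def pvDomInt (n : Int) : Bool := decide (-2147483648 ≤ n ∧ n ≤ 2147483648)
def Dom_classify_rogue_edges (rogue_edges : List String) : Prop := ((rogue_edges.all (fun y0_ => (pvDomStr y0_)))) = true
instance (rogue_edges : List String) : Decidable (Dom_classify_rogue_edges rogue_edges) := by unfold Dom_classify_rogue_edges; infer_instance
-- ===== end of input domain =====

-- B replaces A's three independent scans (two filters + a set difference) by one
-- categorizing pass that appends each name to exactly one of three buckets, sorted at
-- the end (objective: alternative decomposition; same asymptotic cost).

-- ===== PORT A =====
def pvCodePrefixes : List String :=
  ["CALLS_", "DEFINES_", "DEFINES", "IMPORTS_", "EXTENDS_", "IMPLEMENTS_",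
   "CONTAINS_", "CONTAINS", "MEMBER_OF"]

def pvLegacyPrefixes : List String := ["FT_", "OP_", "CO_", "XL_", "DOC_"]

-- _match_prefix: loop with early return over the prefix set (order-independent Bool) = any
def matchPrefix (name : String) (prefixes : List String) : Bool :=
  prefixes.any (fun p =>
    if PySem.Str.endswith p "_" then PySem.Str.startswith name p else name == p)

def classify_rogue_edges (rogue_edges : List String) : List (String × List String) :=
  let code := PySem.List.sorted
    (rogue_edges.filter (fun n => matchPrefix n pvCodePrefixes)) (fun x => x) false
  let legacy := PySem.List.sorted
    (rogue_edges.filter (fun n => matchPrefix n pvLegacyPrefixes)) (fun x => x) false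
  let classified := PySem.Set.union (PySem.Set.ofList code) legacy
  [("code_analysis_residue", code),
   ("legacy_prefixes", legacy),
   ("other", PySem.List.sorted
      (PySem.Set.diff (PySem.Set.ofList rogue_edges) classified) (fun x => x) false)]

-- ===== PORT B =====
def classify_rogue_edges_alt (rogue_edges : List String) : List (String × List String) :=
  let t := rogue_edges.foldl (fun (acc : List String × List String × List String) n =>
      if matchPrefix n pvCodePrefixes then (acc.1 ++ [n], acc.2.1, acc.2.2)
      else if matchPrefix n pvLegacyPrefixes then (acc.1, acc.2.1 ++ [n], acc.2.2)
      else (acc.1, acc.2.1, acc.2.2 ++ [n])) ([], [], [])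
  [("code_analysis_residue", PySem.List.sorted t.1 (fun x => x) false),
   ("legacy_prefixes", PySem.List.sorted t.2.1 (fun x => x) false),
   ("other", PySem.List.sorted t.2.2 (fun x => x) false)]

-- ===== PRECONDITION & SPEC =====
-- The Python parameter is a set[str]; its List encoding holds distinct elements.
def Pre_classify_rogue_edges (rogue_edges : List String) : Prop := rogue_edges.Nodup
instance (rogue_edges : List String) : Decidable (Pre_classify_rogue_edges rogue_edges) := by unfold Pre_classify_rogue_edges; infer_instance

def pvWitness_classify_rogue_edges : List String := ["CALLS_foo", "FT_bar", "misc"]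

def Spec_classify_rogue_edges (rogue_edges : List String) (out : List (String × List String)) : Prop := out = classify_rogue_edges_alt rogue_edges
instance (rogue_edges : List String) (out : List (String × List String)) : Decidable (Spec_classify_rogue_edges rogue_edges out) := by unfold Spec_classify_rogue_edges; infer_instance

-- ===== CLAIM (what is proved, stated in full; the proofs are below) =====
def Claim_equal_classify_rogue_edges : Prop := ∀ (rogue_edges : List String), Dom_classify_rogue_edges rogue_edges → Pre_classify_rogue_edges rogue_edges → Spec_classify_rogue_edges rogue_edges (classify_rogue_edges rogue_edges)

-- ===== LEMMAS AND PROOFS =====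
-- the code-analysis and legacy prefix sets are disjoint: no name matches both
theorem legacy_not_code (n : String) (h : matchPrefix n pvLegacyPrefixes = true) :
    matchPrefix n pvCodePrefixes = false := by
  simp only [matchPrefix, pvLegacyPrefixes, pvCodePrefixes, List.any_cons, List.any_nil,
    Bool.or_eq_true, Bool.or_eq_false_iff] at h ⊢
  norm_num [PySem.Str.startswith_eq, PySem.Chars.startswith_iff] at h ⊢
  simp only [show PySem.Chars.endswith "CALLS_".toList "_".toList = true from by decide, show PySem.Chars.endswith "DEFINES_".toList "_".toList = true from by decide, show PySem.Chars.endswith "DEFINES".toList "_".toList = false from by decide, show PySem.Chars.endswith "IMPORTS_".toList "_".toList = true from by decide, show PySem.Chars.endswith "EXTENDS_".toList "_".toList = true from by decide, show PySem.Chars.endswith "IMPLEMENTS_".toList "_".toList = true from by decide, show PySem.Chars.endswith "CONTAINS_".toList "_".toList = true from by decide, show PySem.Chars.endswith "CONTAINS".toList "_".toList = false from by decide, show PySem.Chars.endswith "MEMBER_OF".toList "_".toList = false from by decide, show PySem.Chars.endswith "FT_".toList "_".toList = true from by decide, show PySem.Chars.endswith "OP_".toList "_".toList = true from by decide, show PySem.Chars.endswith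 "CO_".toList "_".toList = true from by decide, show PySem.Chars.endswith "XL_".toList "_".toList = true from by decide, show PySem.Chars.endswith "DOC_".toList "_".toList = true from by decide] at h ⊢
  simp only [if_true, Bool.false_eq_true, if_false] at h ⊢
  rcases h with h|h|h|h|h <;> obtain ⟨t, ht⟩ := h <;>
    refine ⟨?_, ?_, ?_, ?_, ?_, ?_, ?_, ?_, ?_⟩ <;>
    first
      | (simp [← ht, PySem.Chars.startswith, List.isPrefixOf])
      | (intro e; rw [e] at ht; simp at ht)

theorem bucket3 (xs : List String) (a b c : List String) :
    xs.foldl (fun (acc : List String × List String × List String) n =>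
      if matchPrefix n pvCodePrefixes then (acc.1 ++ [n], acc.2.1, acc.2.2)
      else if matchPrefix n pvLegacyPrefixes then (acc.1, acc.2.1 ++ [n], acc.2.2)
      else (acc.1, acc.2.1, acc.2.2 ++ [n])) (a, b, c)
    = (a ++ xs.filter (fun n => matchPrefix n pvCodePrefixes),
       b ++ xs.filter (fun n => !matchPrefix n pvCodePrefixes && matchPrefix n pvLegacyPrefixes),
       c ++ xs.filter (fun n => !matchPrefix n pvCodePrefixes && !matchPrefix n pvLegacyPrefixes)) := by
  induction xs generalizing a b c with
  | nil => simp
  | cons x xs ih =>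
    by_cases h1 : matchPrefix x pvCodePrefixes = true
    · simp [h1, ih]
    · by_cases h2 : matchPrefix x pvLegacyPrefixes = true
      · simp [h1, h2, ih]
      · simp [h1, h2, ih]

-- ===== VERDICT (by name: the statement is the Claim_ definition above) =====
theorem classify_rogue_edges_spec : Claim_equal_classify_rogue_edges := by
  intro xs _ hnd
  unfold Spec_classify_rogue_edges classify_rogue_edges classify_rogue_edges_alt
  rw [bucket3]
  simp only [List.nil_append]
  have h2 : xs.filter (fun n => !matchPrefix n pvCodePrefixes && matchPrefix n pvLegacyPrefixes)
      = xs.filter (fun n => matchPrefix n pvLegacyPrefixes) := by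
    apply List.filter_congr
    intro x _
    by_cases hl : matchPrefix x pvLegacyPrefixes = true
    · simp [hl, legacy_not_code x hl]
    · simp only [Bool.not_eq_true] at hl; simp [hl]
  have h3 : PySem.Set.diff (PySem.Set.ofList xs)
        (PySem.Set.union
          (PySem.Set.ofList (PySem.List.sorted (xs.filter (fun n => matchPrefix n pvCodePrefixes)) (fun x => x) false))
          (PySem.List.sorted (xs.filter (fun n => matchPrefix n pvLegacyPrefixes)) (fun x => x) false))
      = xs.filter (fun n => !matchPrefix n pvCodePrefixes && !matchPrefix n pvLegacyPrefixes) := by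
    rw [PySem.Set.ofList_eq_self_of_nodup xs hnd]
    simp only [PySem.Set.diff]
    apply List.filter_congr
    intro x hx
    rw [Bool.eq_iff_iff]
    simp [PySem.Set.mem_union, PySem.Set.mem_ofList,
      PySem.List.mem_sorted, List.mem_filter, hx]
  rw [h2, h3]
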